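-- pv_equiv track=rewrite | github.com/GavenHwang/pythonPractice | 00_practice/solution/solution_01.py | throw_dice
-- ===== SOURCE A (Python) =====
-- def throw_dice(s):
--     arr = ['1', '2', '3', '4', '5', '6']
--
--     def throw(operator):
--         if operator == "L":
--             arr[0], arr[1], arr[2], arr[3], arr[4], arr[5] = arr[4], arr[5], arr[2], arr[3], arr[1], arr[0]
--         elif operator == 'R':
--             arr[0], arr[1], arr[2], arr[3], arr[4], arr[5] = arr[5], arr[4], arr[2], arr[3], arr[0], arr[1]
--         elif operator == 'F':
--             arr[0], arr[1], arr[2], arr[3], arr[4], arr[5] = arr[0], arr[1], arr[4], arr[5], arr[3], arr[2]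
--         elif operator == 'B':
--             arr[0], arr[1], arr[2], arr[3], arr[4], arr[5] = arr[0], arr[1], arr[5], arr[4], arr[2], arr[3]
--         elif operator == 'A':
--             arr[0], arr[1], arr[2], arr[3], arr[4], arr[5] = arr[3], arr[2], arr[0], arr[1], arr[4], arr[5]
--         elif operator == 'C':
--             arr[0], arr[1], arr[2], arr[3], arr[4], arr[5] = arr[2], arr[3], arr[1], arr[0], arr[4], arr[5]
--         return arr
--
--     for i in s:
--         throw(i)
--     return ''.join(arr)
-- ===== SOURCE B (Python) =====
-- # For each output position, trace backwards through the reversed string which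
-- # initial face ends up there; six independent scalar traces, no face array.
-- PERM = {
--     'L': [4, 5, 2, 3, 1, 0],
--     'R': [5, 4, 2, 3, 0, 1],
--     'F': [0, 1, 4, 5, 3, 2],
--     'B': [0, 1, 5, 4, 2, 3],
--     'A': [3, 2, 0, 1, 4, 5],
--     'C': [2, 3, 1, 0, 4, 5],
-- }
--
-- def throw_dice(s):
--     def source(i):
--         # walk the operators right-to-left, pulling position i back to its origin
--         for ch in reversed(s):
--             p = PERM.get(ch)
--             if p is not None:
--                 i = p[i]
--         return i
--     return ''.join('123456'[source(i)] for i in range(6))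
-- ===== Notes on version B (the rewrite author's own statement) =====
-- stated objective: alternative
-- what changed: A simulates forward, mutating a 6-face array once per operator; B keeps no array at all: for each of the 6 output positions it scans the string backwards tracing a single integer (the origin of that position) and reads the answer off the initial faces, i.e. per-output backward tracing instead of forward state simulation.
import Mathlib
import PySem

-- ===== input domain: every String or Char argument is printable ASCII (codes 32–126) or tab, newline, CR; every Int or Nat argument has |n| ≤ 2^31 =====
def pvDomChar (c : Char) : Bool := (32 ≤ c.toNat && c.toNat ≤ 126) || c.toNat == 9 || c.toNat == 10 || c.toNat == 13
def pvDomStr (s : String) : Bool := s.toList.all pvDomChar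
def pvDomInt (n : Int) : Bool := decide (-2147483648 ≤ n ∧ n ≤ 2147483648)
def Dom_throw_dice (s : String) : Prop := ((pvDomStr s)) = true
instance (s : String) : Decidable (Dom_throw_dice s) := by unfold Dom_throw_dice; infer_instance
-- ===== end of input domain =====

-- B replaces A's forward simulation of a mutating 6-face array by six independent
-- backward scalar traces (one per output position); alternative decomposition, same cost.

-- ===== PORT A =====
-- Python A mutates a 6-element face array per operator; ported as a foldl over the chars.
def throwStep (arr : List Char) (c : Char) : List Char :=
  match arr with
  | [a0, a1, a2, a3, a4, a5] =>
    if c = 'L' then [a4, a5, a2, a3, a1, a0]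
    else if c = 'R' then [a5, a4, a2, a3, a0, a1]
    else if c = 'F' then [a0, a1, a4, a5, a3, a2]
    else if c = 'B' then [a0, a1, a5, a4, a2, a3]
    else if c = 'A' then [a3, a2, a0, a1, a4, a5]
    else if c = 'C' then [a2, a3, a1, a0, a4, a5]
    else arr
  | _ => arr

def throw_dice (s : String) : String :=
  String.mk (s.toList.foldl throwStep ['1', '2', '3', '4', '5', '6'])

-- ===== PORT B =====
-- PERM.get(ch) from Source B
def permGet? (c : Char) : Option (List Nat) :=
  if c = 'L' then some [4, 5, 2, 3, 1, 0]
  else if c = 'R' then some [5, 4, 2, 3, 0, 1]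
  else if c = 'F' then some [0, 1, 4, 5, 3, 2]
  else if c = 'B' then some [0, 1, 5, 4, 2, 3]
  else if c = 'A' then some [3, 2, 0, 1, 4, 5]
  else if c = 'C' then some [2, 3, 1, 0, 4, 5]
  else none

-- one step of the backward trace: i = p[i] if ch in PERM else i
def srcApply (c : Char) (i : Nat) : Nat :=
  match permGet? c with
  | some p => p.getD i 0
  | none => i

-- 'for ch in reversed(s): ...' pulling position i back to its origin
def source (s : String) (i : Nat) : Nat :=
  s.toList.reverse.foldl (fun j c => srcApply c j) i

-- ''.join('123456'[source(i)] for i in range(6))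
def throw_dice_alt (s : String) : String :=
  String.mk ((List.range 6).map (fun i => "123456".toList.getD (source s i) '?'))

-- ===== PRECONDITION & SPEC =====
def Spec_throw_dice (s : String) (out : String) : Prop := out = throw_dice_alt s
instance (s : String) (out : String) : Decidable (Spec_throw_dice s out) := by unfold Spec_throw_dice; infer_instance

-- ===== CLAIM =====
def Claim_equal_throw_dice : Prop := ∀ (s : String), Dom_throw_dice s → Spec_throw_dice s (throw_dice s)

-- ===== LEMMAS AND PROOFS =====

-- backward trace over a list, foldr form (equals source via List.foldl_reverse)
def trace (l : List Char) (i : Nat) : Nat := l.foldr (fun c j => srcApply c j) i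

lemma step_trace (f : Nat → Char) (c : Char) :
    throwStep [f 0, f 1, f 2, f 3, f 4, f 5] c
      = [f (srcApply c 0), f (srcApply c 1), f (srcApply c 2),
         f (srcApply c 3), f (srcApply c 4), f (srcApply c 5)] := by
  simp only [throwStep, srcApply, permGet?]
  split_ifs <;> rfl

lemma foldl_trace (l : List Char) : ∀ (f : Nat → Char),
    l.foldl throwStep [f 0, f 1, f 2, f 3, f 4, f 5]
      = [f (trace l 0), f (trace l 1), f (trace l 2),
         f (trace l 3), f (trace l 4), f (trace l 5)] := by
  induction l with
  | nil => intro f; rfl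
  | cons c l ih =>
    intro f
    simp only [List.foldl_cons, step_trace]
    exact ih (fun i => f (srcApply c i))

lemma source_eq_trace (s : String) (i : Nat) : source s i = trace s.toList i := by
  simp [source, trace, List.foldl_reverse]

-- ===== VERDICT =====
theorem throw_dice_spec : Claim_equal_throw_dice := by
  intro s _
  show throw_dice s = throw_dice_alt s
  unfold throw_dice throw_dice_alt
  have h := foldl_trace s.toList (fun i => "123456".toList.getD i '?')
  rw [show (['1','2','3','4','5','6'] : List Char)
        = [(fun i => "123456".toList.getD i '?') 0, (fun i => "123456".toList.getD i '?') 1,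
           (fun i => "123456".toList.getD i '?') 2, (fun i => "123456".toList.getD i '?') 3,
           (fun i => "123456".toList.getD i '?') 4, (fun i => "123456".toList.getD i '?') 5] from by decide]
  rw [h]
  simp [List.range_succ, source_eq_trace]
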